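-- pv_equiv track=rewrite | github.com/conorbyrnes04/mythra-glyphnet | glyph_curation_backend.py | suggest_prompt_improvements
-- ===== SOURCE A (Python) =====
-- from typing import Dict, List, Optional, Any
--
-- def suggest_prompt_improvements(feedback: str, style: str) -> List[str]:
--     """Suggest specific prompt improvements based on feedback."""
--
--     suggestions = []
--     feedback_lower = feedback.lower()
--
--     # Detail improvements
--     if any(word in feedback_lower for word in ["detail", "intricate", "complex"]):
--         suggestions.append("Add 'highly detailed' and 'intricate patterns' to prompts")
--         suggestions.append("Emphasize 'fine line work' and 'precise ornamentation'")
--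
--     # Balance improvements
--     if any(word in feedback_lower for word in ["balance", "symmetry", "proportion"]):
--         suggestions.append("Add 'perfect symmetry' and 'balanced composition' to prompts")
--         suggestions.append("Emphasize 'harmonious proportions' and 'centered design'")
--
--     # Movement improvements
--     if any(word in feedback_lower for word in ["dynamic", "flow", "movement"]):
--         suggestions.append("Add 'dynamic movement' and 'flowing lines' to prompts")
--         suggestions.append("Emphasize 'rhythmic patterns' and 'energetic composition'")
--
--     # Style improvements
--     if any(word in feedback_lower for word in ["celtic", "knotwork", "spiral"]):
--         suggestions.append("Strengthen Celtic knotwork and spiral motifs in prompts")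
--         suggestions.append("Add 'traditional Celtic patterns' and 'ancient knotwork'")
--
--     # Contrast improvements
--     if any(word in feedback_lower for word in ["contrast", "bold", "strong"]):
--         suggestions.append("Emphasize 'strong contrast' and 'bold lines' in prompts")
--         suggestions.append("Add 'high contrast' and 'sharp definition'")
--
--     # Composition improvements
--     if any(word in feedback_lower for word in ["composition", "layout", "design"]):
--         suggestions.append("Focus on 'strong composition' and 'balanced layout'")
--         suggestions.append("Emphasize 'well-structured design' and 'harmonious arrangement'")
--
--     return suggestions
-- ===== SOURCE B (Python) =====
-- # B: naive multi-pattern text scan -- walk the lowered feedback once and at each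
-- # position test all keywords (startswith), collecting the matched keywords into a
-- # set; then emit the suggestion pair for each rule whose keyword set was hit.
-- _RULES = [
--     (("detail", "intricate", "complex"),
--      ("Add 'highly detailed' and 'intricate patterns' to prompts",
--       "Emphasize 'fine line work' and 'precise ornamentation'")),
--     (("balance", "symmetry", "proportion"),
--      ("Add 'perfect symmetry' and 'balanced composition' to prompts",
--       "Emphasize 'harmonious proportions' and 'centered design'")),
--     (("dynamic", "flow", "movement"),
--      ("Add 'dynamic movement' and 'flowing lines' to prompts",
--       "Emphasize 'rhythmic patterns' and 'energetic composition'")),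
--     (("celtic", "knotwork", "spiral"),
--      ("Strengthen Celtic knotwork and spiral motifs in prompts",
--       "Add 'traditional Celtic patterns' and 'ancient knotwork'")),
--     (("contrast", "bold", "strong"),
--      ("Emphasize 'strong contrast' and 'bold lines' in prompts",
--       "Add 'high contrast' and 'sharp definition'")),
--     (("composition", "layout", "design"),
--      ("Focus on 'strong composition' and 'balanced layout'",
--       "Emphasize 'well-structured design' and 'harmonious arrangement'")),
-- ]
-- _ALL_KEYWORDS = [kw for kws, _ in _RULES for kw in kws]
--
-- def suggest_prompt_improvements(feedback: str, style: str):
--     text = feedback.lower()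
--     matched = set()
--     for i in range(len(text)):
--         for kw in _ALL_KEYWORDS:
--             if text.startswith(kw, i):
--                 matched.add(kw)
--     out = []
--     for kws, (s1, s2) in _RULES:
--         if any(k in matched for k in kws):
--             out.append(s1)
--             out.append(s2)
--     return out
-- ===== Notes on version B (the rewrite author's own statement) =====
-- stated objective: alternative
-- what changed: Instead of six independent 'keyword in feedback' substring tests, B runs a naive multi-pattern matcher: one scan over the positions of the lowered feedback collecting the set of keywords that start there, then one pass over the rule table emitting the suggestion pair of each rule whose keyword set was matched.
import Mathlib
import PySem

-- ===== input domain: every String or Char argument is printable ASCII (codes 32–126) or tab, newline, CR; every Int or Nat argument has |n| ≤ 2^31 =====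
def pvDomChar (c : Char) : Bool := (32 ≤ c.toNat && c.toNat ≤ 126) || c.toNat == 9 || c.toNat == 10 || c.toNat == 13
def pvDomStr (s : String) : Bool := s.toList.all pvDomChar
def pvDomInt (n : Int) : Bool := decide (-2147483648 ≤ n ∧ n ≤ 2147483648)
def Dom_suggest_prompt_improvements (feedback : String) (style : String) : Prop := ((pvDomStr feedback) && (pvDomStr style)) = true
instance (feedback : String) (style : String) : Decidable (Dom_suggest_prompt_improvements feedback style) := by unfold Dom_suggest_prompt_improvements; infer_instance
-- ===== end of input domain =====

-- B replaces A's six independent substring tests by a naive multi-pattern matcher: one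
-- scan over the positions of the lowered feedback collecting the set of keywords that
-- start there, then one pass over the rule table (alternative decomposition; same cost).

-- ===== PORT A =====
def suggest_prompt_improvements (feedback : String) (style : String) : List String :=
  let fl := PySem.Str.lower feedback
  let suggestions : List String := []
  let suggestions := if ["detail", "intricate", "complex"].any (fun w => PySem.Str.isIn w fl) then suggestions ++ ["Add 'highly detailed' and 'intricate patterns' to prompts"] ++ ["Emphasize 'fine line work' and 'precise ornamentation'"] else suggestions
  let suggestions := if ["balance", "symmetry", "proportion"].any (fun w => PySem.Str.isIn w fl) then suggestions ++ ["Add 'perfect symmetry' and 'balanced composition' to prompts"] ++ ["Emphasize 'harmonious proportions' and 'centered design'"] else suggestions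
  let suggestions := if ["dynamic", "flow", "movement"].any (fun w => PySem.Str.isIn w fl) then suggestions ++ ["Add 'dynamic movement' and 'flowing lines' to prompts"] ++ ["Emphasize 'rhythmic patterns' and 'energetic composition'"] else suggestions
  let suggestions := if ["celtic", "knotwork", "spiral"].any (fun w => PySem.Str.isIn w fl) then suggestions ++ ["Strengthen Celtic knotwork and spiral motifs in prompts"] ++ ["Add 'traditional Celtic patterns' and 'ancient knotwork'"] else suggestions
  let suggestions := if ["contrast", "bold", "strong"].any (fun w => PySem.Str.isIn w fl) then suggestions ++ ["Emphasize 'strong contrast' and 'bold lines' in prompts"] ++ ["Add 'high contrast' and 'sharp definition'"] else suggestions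
  let suggestions := if ["composition", "layout", "design"].any (fun w => PySem.Str.isIn w fl) then suggestions ++ ["Focus on 'strong composition' and 'balanced layout'"] ++ ["Emphasize 'well-structured design' and 'harmonious arrangement'"] else suggestions
  suggestions

-- ===== PORT B =====
def pvRules : List (List String × (String × String)) :=
  [(["detail", "intricate", "complex"], ("Add 'highly detailed' and 'intricate patterns' to prompts", "Emphasize 'fine line work' and 'precise ornamentation'")),
  (["balance", "symmetry", "proportion"], ("Add 'perfect symmetry' and 'balanced composition' to prompts", "Emphasize 'harmonious proportions' and 'centered design'")),
  (["dynamic", "flow", "movement"], ("Add 'dynamic movement' and 'flowing lines' to prompts", "Emphasize 'rhythmic patterns' and 'energetic composition'")),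
  (["celtic", "knotwork", "spiral"], ("Strengthen Celtic knotwork and spiral motifs in prompts", "Add 'traditional Celtic patterns' and 'ancient knotwork'")),
  (["contrast", "bold", "strong"], ("Emphasize 'strong contrast' and 'bold lines' in prompts", "Add 'high contrast' and 'sharp definition'")),
  (["composition", "layout", "design"], ("Focus on 'strong composition' and 'balanced layout'", "Emphasize 'well-structured design' and 'harmonious arrangement'"))]

def pvAllKeywords : List String :=
  pvRules.foldl (fun acc r => acc ++ r.1) []

-- the position scan: at each position (suffix of the text) test every keyword with
-- startswith, collecting matched keywords into the set (Python's 'for i in range(len(text))')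
def pvScan : List Char → PySem.Set String → PySem.Set String
  | [], matched => matched
  | c :: rest, matched =>
      pvScan rest (pvAllKeywords.foldl
        (fun m kw => if PySem.Chars.startswith (c :: rest) kw.toList then PySem.Set.add m kw else m) matched)

def suggest_prompt_improvements_alt (feedback : String) (style : String) : List String :=
  let text := PySem.Str.lower feedback
  let matched := pvScan text.toList PySem.Set.empty
  pvRules.foldl (fun out r =>
    if r.1.any (fun k => PySem.Set.contains matched k) then out ++ [r.2.1, r.2.2] else out) []

-- ===== PRECONDITION & SPEC =====
def Spec_suggest_prompt_improvements (feedback : String) (style : String) (out : List String) : Prop := out = suggest_prompt_improvements_alt feedback style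
instance (feedback : String) (style : String) (out : List String) : Decidable (Spec_suggest_prompt_improvements feedback style out) := by unfold Spec_suggest_prompt_improvements; infer_instance

-- ===== CLAIM (what is proved, stated in full; the proofs are below) =====
def Claim_equal_suggest_prompt_improvements : Prop := ∀ (feedback : String) (style : String), Dom_suggest_prompt_improvements feedback style → Spec_suggest_prompt_improvements feedback style (suggest_prompt_improvements feedback style)

-- ===== LEMMAS AND PROOFS =====

-- membership in the inner fold over the keyword list
lemma mem_innerfold (chars : List Char) (L : List String) : ∀ (m : PySem.Set String) (x : String),
    x ∈ L.foldl (fun m kw => if PySem.Chars.startswith chars kw.toList then PySem.Set.add m kw else m) m ↔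
      x ∈ m ∨ (x ∈ L ∧ PySem.Chars.startswith chars x.toList = true) := by
  induction L with
  | nil => intro m x; simp
  | cons kw L ih =>
      intro m x
      simp only [List.foldl_cons, ih]
      by_cases h : PySem.Chars.startswith chars kw.toList = true
      · simp only [h, if_pos]
        rw [PySem.Set.mem_add]
        constructor
        · rintro ((h1 | h1) | h1)
          · exact Or.inl h1
          · subst h1; exact Or.inr ⟨List.mem_cons_self, h⟩
          · exact Or.inr ⟨List.mem_cons_of_mem _ h1.1, h1.2⟩
        · rintro (h1 | ⟨h1, h2⟩)
          · exact Or.inl (Or.inl h1)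
          · rcases List.mem_cons.mp h1 with h1 | h1
            · exact Or.inl (Or.inr h1)
            · exact Or.inr ⟨h1, h2⟩
      · simp only [h, Bool.false_eq_true]
        constructor
        · rintro (h1 | h1)
          · exact Or.inl h1
          · exact Or.inr ⟨List.mem_cons_of_mem _ h1.1, h1.2⟩
        · rintro (h1 | ⟨h1, h2⟩)
          · exact Or.inl h1
          · rcases List.mem_cons.mp h1 with h1 | h1
            · exact absurd (h1 ▸ h2) h
            · exact Or.inr ⟨h1, h2⟩

-- membership after the whole position scan: exactly the keywords starting at some position
lemma mem_pvScan (x : String) : ∀ (chars : List Char) (m : PySem.Set String),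
    x ∈ pvScan chars m ↔
      x ∈ m ∨ (x ∈ pvAllKeywords ∧ ∃ j, j < chars.length ∧ PySem.Chars.startswith (chars.drop j) x.toList = true) := by
  intro chars
  induction chars with
  | nil => intro m; simp [pvScan]
  | cons c rest ih =>
      intro m
      rw [pvScan, ih, mem_innerfold]
      constructor
      · rintro ((h | ⟨h1, h2⟩) | ⟨h1, j, hj, h2⟩)
        · exact Or.inl h
        · exact Or.inr ⟨h1, 0, by simp, by simpa using h2⟩
        · exact Or.inr ⟨h1, j + 1, by simpa using hj, by simpa using h2⟩
      · rintro (h | ⟨h1, j, hj, h2⟩)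
        · exact Or.inl (Or.inl h)
        · cases j with
          | zero => exact Or.inl (Or.inr ⟨h1, by simpa using h2⟩)
          | succ j => exact Or.inr ⟨h1, j, by simp only [List.length_cons] at hj; omega, by simpa using h2⟩

-- a nonempty keyword starts at some position < length iff it is a substring
lemma exists_pos_iff_isIn (x : String) (hx : x.toList ≠ []) (chars : List Char) :
    (∃ j, j < chars.length ∧ PySem.Chars.startswith (chars.drop j) x.toList = true) ↔
      PySem.Chars.isIn x.toList chars = true := by
  rw [← PySem.Chars.exists_prefix_drop_iff_isIn]
  constructor
  · rintro ⟨j, _, h⟩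
    exact ⟨j, (PySem.Chars.startswith_iff _ _).mp h⟩
  · rintro ⟨j, h⟩
    by_cases hj : j < chars.length
    · exact ⟨j, hj, (PySem.Chars.startswith_iff _ _).mpr h⟩
    · exfalso
      rw [List.drop_eq_nil_of_le (by omega)] at h
      exact hx (List.prefix_nil.mp h)

-- the condition B tests per keyword equals the condition A tests
lemma contains_scan_eq (x : String) (hx : x ∈ pvAllKeywords) (hne : x.toList ≠ []) (chars : List Char) :
    PySem.Set.contains (pvScan chars PySem.Set.empty) x = PySem.Chars.isIn x.toList chars := by
  rw [Bool.eq_iff_iff, PySem.Set.contains_iff, mem_pvScan, exists_pos_iff_isIn x hne chars]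
  simp [PySem.Set.empty, hx]

-- ===== VERDICT (by name: the statement is the Claim_ definition above) =====
theorem suggest_prompt_improvements_spec : Claim_equal_suggest_prompt_improvements := by
  intro feedback style _
  unfold Spec_suggest_prompt_improvements suggest_prompt_improvements suggest_prompt_improvements_alt
  simp only [pvRules, List.foldl_cons, List.foldl_nil, List.any_cons, List.any_nil,
    PySem.Str.isIn_eq]
  rw [contains_scan_eq "detail" (by decide) (by decide),
      contains_scan_eq "intricate" (by decide) (by decide),
      contains_scan_eq "complex" (by decide) (by decide),
      contains_scan_eq "balance" (by decide) (by decide),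
      contains_scan_eq "symmetry" (by decide) (by decide),
      contains_scan_eq "proportion" (by decide) (by decide),
      contains_scan_eq "dynamic" (by decide) (by decide),
      contains_scan_eq "flow" (by decide) (by decide),
      contains_scan_eq "movement" (by decide) (by decide),
      contains_scan_eq "celtic" (by decide) (by decide),
      contains_scan_eq "knotwork" (by decide) (by decide),
      contains_scan_eq "spiral" (by decide) (by decide),
      contains_scan_eq "contrast" (by decide) (by decide),
      contains_scan_eq "bold" (by decide) (by decide),
      contains_scan_eq "strong" (by decide) (by decide),
      contains_scan_eq "composition" (by decide) (by decide),
      contains_scan_eq "layout" (by decide) (by decide),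
      contains_scan_eq "design" (by decide) (by decide)]
  split_ifs <;> rfl
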